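-- pv_equiv track=rewrite | github.com/StephenJasina/linear-geodesic-optimization | src/collation.py | remove_loops
-- ===== SOURCE A (Python) =====
-- import typing
--
-- def remove_loops(path: typing.List[int]):
--     """
--     Remove loops in a path.
--
--     As input, take a list of vertex indices. This traces out a path that
--     might intersect itself. This function simply removes all loops, so
--     the resulting path is a sequence of unique vertex indices starting
--     and ending at the same location, and each edge in the new path is
--     one of the edges in the original path.
--     """
--     indices = {}
--     path_new = []
--
--     for v in path:
--         if v in indices:
--             for _ in range(len(path_new) - indices[v] - 1):
--                 indices.pop(path_new.pop())
--         else: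
--             indices[v] = len(path_new)
--             path_new.append(v)
--
--     return path_new
-- ===== SOURCE B (Python) =====
-- def remove_loops(path):
--     # Jump-to-last-occurrence scan: precompute each vertex's last index once,
--     # then walk the path, keeping the current vertex and skipping straight past
--     # its final occurrence.  No stack and no unwinding at all.
--     last = {}
--     for i, v in enumerate(path):
--         last[v] = i
--     out = []
--     i = 0
--     while i < len(path):
--         v = path[i]
--         out.append(v)
--         i = last[v] + 1
--     return out
-- ===== Notes on version B (the rewrite author's own statement) =====
-- stated objective: alternative
-- what changed: B abandons the stack-and-unwind strategy entirely: it precomputes each vertex's last occurrence index in one pass, then walks the path by jumping directly past the last occurrence of the current vertex (i = last[v] + 1), collecting the kept vertices forward; nothing is ever pushed, popped or unwound.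
import Mathlib
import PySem

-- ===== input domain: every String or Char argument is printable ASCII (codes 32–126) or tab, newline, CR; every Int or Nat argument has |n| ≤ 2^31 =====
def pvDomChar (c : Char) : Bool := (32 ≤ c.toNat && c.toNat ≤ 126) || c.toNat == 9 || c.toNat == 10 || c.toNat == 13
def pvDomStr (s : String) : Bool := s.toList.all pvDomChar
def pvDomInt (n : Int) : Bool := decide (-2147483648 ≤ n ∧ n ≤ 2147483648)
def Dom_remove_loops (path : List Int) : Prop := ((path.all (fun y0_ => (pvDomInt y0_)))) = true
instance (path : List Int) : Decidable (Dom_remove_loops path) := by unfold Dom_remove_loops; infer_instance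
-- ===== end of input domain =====

-- B abandons the stack-and-unwind strategy: it precomputes each vertex's last
-- occurrence index once, then walks the path jumping straight past the last
-- occurrence of the current vertex; same O(n) cost, a different algorithm.

-- ===== PORT A =====
-- `path_new` is kept REVERSED (head = Python's end of list): append = cons, pop = tail.
-- the inner counted pop loop: pop `path_new.pop()` from the list and its key from the dict, n times
def pvPopA : Nat → PySem.Dict Int Int → List Int → PySem.Dict Int Int × List Int
  | 0, d, l => (d, l)
  | _ + 1, d, [] => (d, [])  -- unreachable: the count is always < len(path_new)
  | n + 1, d, x :: l => pvPopA n (d.erase x) l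

def pvStepA (st : PySem.Dict Int Int × List Int) (v : Int) : PySem.Dict Int Int × List Int :=
  match st.1.get? v with
  | some i => pvPopA ((st.2.length : Int) - i - 1).toNat st.1 st.2  -- range(len(path_new) - indices[v] - 1)
  | none => (st.1.insert v (st.2.length : Int), v :: st.2)

def remove_loops (path : List Int) : List Int :=
  ((path.foldl pvStepA (PySem.Dict.empty, [])).2).reverse

-- ===== PORT B =====
-- `out` is accumulated REVERSED (append = cons) and reversed on return.
-- the while loop: fuel = path.length + 1 iterations always suffice, since i
-- strictly increases by at least 1 per iteration (last[path[i]] ≥ i).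
def pvLoopB (lastD : PySem.Dict Int Int) (path : List Int) : Nat → Int → List Int → List Int
  | 0, _, acc => acc.reverse  -- fuel exhausted: unreachable with the fuel given below
  | fuel + 1, i, acc =>
    if i < PySem.List.len path then
      match PySem.List.pyGet? path i with
      | some v =>
        match lastD.get? v with
        | some j => pvLoopB lastD path fuel (j + 1) (v :: acc)
        | none => acc.reverse  -- unreachable: v = path[i] was inserted into `last`
      | none => acc.reverse    -- unreachable: 0 ≤ i < len(path)
    else acc.reverse

def remove_loops_alt (path : List Int) : List Int :=
  let lastD := (PySem.List.enumerate path 0).foldl (fun d p => d.insert p.2 p.1) PySem.Dict.empty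
  pvLoopB lastD path (path.length + 1) 0 []

-- ===== PRECONDITION & SPEC =====
def Spec_remove_loops (path : List Int) (out : List Int) : Prop := out = remove_loops_alt path
instance (path : List Int) (out : List Int) : Decidable (Spec_remove_loops path out) := by unfold Spec_remove_loops; infer_instance

-- ===== CLAIM (what is proved, stated in full; the proofs are below) =====
def Claim_equal_remove_loops : Prop := ∀ (path : List Int), Dom_remove_loops path → Spec_remove_loops path (remove_loops path)

-- ===== LEMMAS AND PROOFS =====

-- last occurrence index of v in a list (proof-side reference)
def pvLast? (v : Int) : List Int → Option Nat
  | [] => none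
  | x :: t =>
    match pvLast? v t with
    | some k => some (k + 1)
    | none => if x = v then some 0 else none

-- suffix strictly after the last occurrence of v (the whole list if v is absent)
def pvAfterLast (v : Int) : List Int → List Int
  | [] => []
  | x :: t => if v ∈ t then pvAfterLast v t else if x = v then t else x :: t

lemma pvAfterLast_length_le (v : Int) : ∀ l : List Int, (pvAfterLast v l).length ≤ l.length := by
  intro l
  induction l with
  | nil => simp [pvAfterLast]
  | cons x t ih =>
    simp only [pvAfterLast]
    split_ifs <;> simp_all <;> omega

-- the common result of both programs: keep the head, jump past its last occurrence
def pvR : List Int → List Int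
  | [] => []
  | v :: t => v :: pvR (pvAfterLast v t)
termination_by l => l.length
decreasing_by
  have := pvAfterLast_length_le v t
  simp
  omega

lemma pvR_nil : pvR [] = [] := by rw [pvR]

lemma pvR_cons (v : Int) (t : List Int) : pvR (v :: t) = v :: pvR (pvAfterLast v t) := by rw [pvR]

lemma pvAfterLast_of_not_mem (v : Int) (l : List Int) (h : v ∉ l) : pvAfterLast v l = l := by
  induction l with
  | nil => rfl
  | cons x t ih =>
    simp only [List.mem_cons, not_or] at h
    simp only [pvAfterLast]
    rw [if_neg h.2, if_neg (fun hx => h.1 hx.symm)]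

lemma pvAfterLast_subset (v x : Int) : ∀ l : List Int, x ∈ pvAfterLast v l → x ∈ l := by
  intro l
  induction l with
  | nil => simp [pvAfterLast]
  | cons y t ih =>
    simp only [pvAfterLast]
    split_ifs with h1 h2
    · intro h; exact List.mem_cons_of_mem _ (ih h)
    · intro h; exact List.mem_cons_of_mem _ h
    · exact id

lemma pvAfterLast_cons_self (v : Int) (t : List Int) : pvAfterLast v (v :: t) = pvAfterLast v t := by
  by_cases h : v ∈ t
  · simp [pvAfterLast, h]
  · simp [pvAfterLast, h, pvAfterLast_of_not_mem v t h]

lemma pvAfterLast_append (v : Int) : ∀ (s t : List Int), v ∉ s →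
    pvAfterLast v (s ++ v :: t) = pvAfterLast v t := by
  intro s
  induction s with
  | nil => intro t _; exact pvAfterLast_cons_self v t
  | cons y s' ih =>
    intro t h
    simp only [List.mem_cons, not_or] at h
    have hmem : v ∈ s' ++ v :: t := List.mem_append.mpr (Or.inr (List.mem_cons_self ..))
    simp only [List.cons_append, pvAfterLast, hmem, if_pos]
    exact ih t h.2

lemma pvLast?_eq_none_iff (v : Int) : ∀ l : List Int, pvLast? v l = none ↔ v ∉ l := by
  intro l
  induction l with
  | nil => simp [pvLast?]
  | cons x t ih =>
    simp only [pvLast?]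
    cases h : pvLast? v t with
    | some k =>
      have : v ∈ t := by
        by_contra hv
        simp [ih.mpr hv] at h
      simp [this]
    | none =>
      have hvt : v ∉ t := ih.mp h
      by_cases hx : x = v <;> simp_all [eq_comm]

lemma pvLast?_ge (v : Int) : ∀ (l : List Int) (i : Nat), l[i]? = some v →
    ∃ j, pvLast? v l = some j ∧ i ≤ j := by
  intro l
  induction l with
  | nil => intro i h; simp at h
  | cons x t ih =>
    intro i h
    cases i with
    | zero =>
      have hx : x = v := by simpa using h
      cases ht : pvLast? v t with
      | some k => exact ⟨k + 1, by simp [pvLast?, ht], Nat.zero_le _⟩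
      | none => exact ⟨0, by simp [pvLast?, ht, hx], Nat.zero_le _⟩
    | succ i' =>
      simp only [List.getElem?_cons_succ] at h
      obtain ⟨j, hj, hij⟩ := ih i' h
      exact ⟨j + 1, by simp [pvLast?, hj], by omega⟩

lemma pvLast?_drop (v : Int) : ∀ (i : Nat) (l : List Int) (j : Nat), pvLast? v l = some j → i ≤ j →
    pvLast? v (l.drop i) = some (j - i) := by
  intro i
  induction i with
  | zero => intro l j h _; simpa using h
  | succ i' ih =>
    intro l j h hij
    cases l with
    | nil => simp [pvLast?] at h
    | cons x t =>
      simp only [pvLast?] at h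
      cases ht : pvLast? v t with
      | some k =>
        rw [ht] at h
        simp only [Option.some.injEq] at h
        have h2 : pvLast? v (t.drop i') = some (k - i') := ih t k ht (by omega)
        rw [List.drop_succ_cons, h2]
        congr 1
        omega
      | none =>
        rw [ht] at h
        split_ifs at h
        simp only [Option.some.injEq] at h
        omega

lemma pvLast?_not_mem_drop (v : Int) : ∀ (l : List Int) (j : Nat), pvLast? v l = some j →
    v ∉ l.drop (j + 1) := by
  intro l
  induction l with
  | nil => simp
  | cons x t ih =>
    intro j h
    simp only [pvLast?] at h
    cases ht : pvLast? v t with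
    | some k =>
      rw [ht] at h
      simp only [Option.some.injEq] at h
      have hj : j = k + 1 := h.symm
      subst hj
      simpa using ih k ht
    | none =>
      rw [ht] at h
      split_ifs at h with hx
      have h0 : j = 0 := by simpa using h.symm
      subst h0
      have hvt : v ∉ t := (pvLast?_eq_none_iff v t).mp ht
      simpa using hvt

-- pvAfterLast via pvLast?
lemma pvAfterLast_eq_drop (v : Int) : ∀ (l : List Int) (k : Nat), pvLast? v l = some k →
    pvAfterLast v l = l.drop (k + 1) := by
  intro l
  induction l with
  | nil => intro k h; simp [pvLast?] at h
  | cons x t ih =>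
    intro k h
    simp only [pvLast?] at h
    cases ht : pvLast? v t with
    | some k' =>
      rw [ht] at h
      simp only [Option.some.injEq] at h
      subst h
      have hvt : v ∈ t := by
        by_contra hv
        simp [(pvLast?_eq_none_iff v t).mpr hv] at ht
      simp [pvAfterLast, hvt, ih k' ht]
    | none =>
      rw [ht] at h
      split_ifs at h with hx <;> simp_all
      subst h
      simp [pvAfterLast, (pvLast?_eq_none_iff v t).mp ht, hx, List.drop_one]

-- the jump target of B performs the recursion step of pvR
lemma pvAfterLast_drop (path : List Int) (i j : Nat) (v : Int)
    (hi : path[i]? = some v) (hj : pvLast? v path = some j) :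
    pvAfterLast v (path.drop (i + 1)) = path.drop (j + 1) := by
  obtain ⟨j', hj', hij'⟩ := pvLast?_ge v path i hi
  rw [hj] at hj'
  obtain rfl : j = j' := by simpa using hj'
  by_cases hgt : i + 1 ≤ j
  · have h1 : pvLast? v (path.drop (i + 1)) = some (j - (i + 1)) :=
      pvLast?_drop v (i + 1) path j hj hgt
    rw [pvAfterLast_eq_drop v _ _ h1, List.drop_drop]
    congr 1
    omega
  · have hji : j = i := by omega
    subst hji
    have hnm : v ∉ path.drop (j + 1) := pvLast?_not_mem_drop v path j hj
    exact pvAfterLast_of_not_mem v _ hnm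

-- ===== B side =====

-- the dict `last` built by the enumerate loop holds exactly the last occurrence indices
lemma pvLastD_get (v : Int) : ∀ (l : List Int) (d : PySem.Dict Int Int) (s : Int),
    ((PySem.List.enumerate l s).foldl (fun d p => d.insert p.2 p.1) d).get? v =
      match pvLast? v l with
      | some k => some (s + k)
      | none => d.get? v := by
  intro l
  induction l with
  | nil => intro d s; simp [PySem.List.enumerate_nil, pvLast?]
  | cons x t ih =>
    intro d s
    rw [PySem.List.enumerate_cons, List.foldl_cons, ih (d.insert x s) (s + 1)]
    simp only [pvLast?]
    cases ht : pvLast? v t with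
    | some k =>
      simp only
      congr 1
      push_cast
      ring
    | none =>
      by_cases hx : x = v
      · subst hx
        simp [PySem.Dict.get?_insert_self]
      · rw [if_neg hx]
        exact PySem.Dict.get?_insert_of_ne d s (fun h => hx h.symm)

-- the while loop of B computes pvR of the remaining path
lemma pvLoopB_eq (path : List Int) (lastD : PySem.Dict Int Int)
    (hD : ∀ v, lastD.get? v = (pvLast? v path).map (fun k => (k : Int))) :
    ∀ (fuel i : Nat) (acc : List Int), path.length - i ≤ fuel →
      pvLoopB lastD path fuel (i : Int) acc = acc.reverse ++ pvR (path.drop i) := by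
  intro fuel
  induction fuel with
  | zero =>
    intro i acc h
    have : path.length ≤ i := by omega
    simp [pvLoopB, List.drop_eq_nil_of_le this, pvR_nil]
  | succ fuel ih =>
    intro i acc h
    by_cases hi : i < path.length
    · have hcond : ((i : Int) < PySem.List.len path) := by
        simp [PySem.List.len_eq]
        exact_mod_cast hi
      have hv : path[i]? = some path[i] := List.getElem?_eq_getElem hi
      obtain ⟨j, hj, hij⟩ := pvLast?_ge path[i] path i hv
      have hget : lastD.get? path[i] = some (j : Int) := by rw [hD, hj]; rfl
      have hstep : pvLoopB lastD path (fuel + 1) (i : Int) acc =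
          pvLoopB lastD path fuel ((j : Int) + 1) (path[i] :: acc) := by
        simp only [pvLoopB, if_pos hcond, PySem.List.pyGet?_natCast, hv, hget]
      have hcast : ((j : Int) + 1) = ((j + 1 : Nat) : Int) := by push_cast; ring
      rw [hstep, hcast, ih (j + 1) (path[i] :: acc) (by omega), List.reverse_cons,
        List.drop_eq_getElem_cons hi, pvR_cons,
        pvAfterLast_drop path i j path[i] hv hj]
      simp
    · have hlen : path.length ≤ i := by omega
      simp [pvLoopB, hi, List.drop_eq_nil_of_le hlen, pvR_nil]

lemma remove_loops_alt_eq_pvR (path : List Int) : remove_loops_alt path = pvR path := by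
  unfold remove_loops_alt
  have hD : ∀ v, ((PySem.List.enumerate path 0).foldl (fun d p => d.insert p.2 p.1)
      PySem.Dict.empty).get? v = (pvLast? v path).map (fun k => (k : Int)) := by
    intro v
    rw [pvLastD_get v path PySem.Dict.empty 0]
    cases h : pvLast? v path <;> simp [PySem.Dict.get?_empty]
  have := pvLoopB_eq path _ hD (path.length + 1) 0 [] (by omega)
  simpa using this

-- ===== A side =====

-- erase is a filter on the items, get? the first find: pointwise description of erase
lemma pv_get?_erase (d : PySem.Dict Int Int) (k x : Int) :
    (d.erase k).get? x = if x = k then none else d.get? x := by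
  obtain ⟨items⟩ := d
  induction items with
  | nil => simp [PySem.Dict.erase, PySem.Dict.get?]
  | cons p rest ih =>
    by_cases hpk : p.1 = k <;> by_cases hpx : p.1 = x <;>
      simp_all [PySem.Dict.erase, PySem.Dict.get?]

lemma pvPopA_snd : ∀ (k : Nat) (d : PySem.Dict Int Int) (l : List Int),
    (pvPopA k d l).2 = l.drop k := by
  intro k
  induction k with
  | zero => intro d l; simp [pvPopA]
  | succ n ih =>
    intro d l
    cases l with
    | nil => simp [pvPopA]
    | cons x t => simpa [pvPopA] using ih (d.erase x) t

lemma pvPopA_get? : ∀ (k : Nat) (d : PySem.Dict Int Int) (l : List Int) (x : Int),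
    (pvPopA k d l).1.get? x = if x ∈ l.take k then none else d.get? x := by
  intro k
  induction k with
  | zero => intro d l x; simp [pvPopA]
  | succ n ih =>
    intro d l x
    cases l with
    | nil => simp [pvPopA]
    | cons y t =>
      rw [show pvPopA (n + 1) d (y :: t) = pvPopA n (d.erase y) t from rfl, ih,
        pv_get?_erase]
      by_cases h1 : x ∈ t.take n <;> by_cases h2 : x = y <;>
        simp_all [List.take_succ_cons]

-- invariant: the dict holds each stacked vertex's position from the bottom
def pvInv (d : PySem.Dict Int Int) (l : List Int) : Prop :=
  ∀ x : Int, d.get? x = if x ∈ l then some ((l.length : Int) - 1 - (l.idxOf x : Int)) else none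

lemma pvInv_push (d : PySem.Dict Int Int) (l : List Int) (x : Int)
    (hd : pvInv d l) (hx : x ∉ l) : pvInv (d.insert x (l.length : Int)) (x :: l) := by
  intro y
  rw [PySem.Dict.get?_insert]
  by_cases hyx : y = x
  · subst hyx
    rw [if_pos rfl, if_pos (List.mem_cons_self ..)]
    simp [List.idxOf_cons_self]
  · rw [if_neg hyx, hd y, List.idxOf_cons_ne l (fun h => hyx h.symm)]
    by_cases hy : y ∈ l
    · rw [if_pos hy, if_pos (List.mem_cons.mpr (Or.inr hy))]
      congr 1
      have := List.idxOf_lt_length_of_mem hy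
      simp only [List.length_cons]
      push_cast
      omega
    · rw [if_neg hy, if_neg (fun h => (List.mem_cons.mp h).elim hyx hy)]

lemma pvR_subset : ∀ (l : List Int) (x : Int), x ∈ pvR l → x ∈ l := by
  intro l
  induction l using pvR.induct with
  | case1 => simp [pvR]
  | case2 v t ih =>
    intro x hx
    rw [pvR_cons] at hx
    rcases List.mem_cons.mp hx with h | h
    · exact h ▸ List.mem_cons_self ..
    · exact List.mem_cons_of_mem _ (pvAfterLast_subset v x t (ih x h))

-- first-occurrence split
lemma pv_mem_split_first (v : Int) : ∀ l : List Int, v ∈ l →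
    ∃ s t, l = s ++ v :: t ∧ v ∉ s := by
  intro l
  induction l with
  | nil => intro h; cases h
  | cons x q ih =>
    intro h
    by_cases hx : x = v
    · exact ⟨[], q, by simp [hx], by simp⟩
    · rcases List.mem_cons.mp h with h1 | h1
      · exact absurd h1.symm hx
      · obtain ⟨s, t, rfl, hns⟩ := ih h1
        refine ⟨x :: s, t, rfl, ?_⟩
        simp only [List.mem_cons, not_or]
        exact ⟨fun h => hx h.symm, hns⟩

-- popping the whole front of the stack restores the invariant for the remainder
lemma pvInv_pop (d : PySem.Dict Int Int) (front l : List Int)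
    (hinv : pvInv d (front ++ l)) (hnd : (front ++ l).Nodup) :
    pvInv (pvPopA front.length d (front ++ l)).1 l := by
  intro x
  rw [pvPopA_get?, List.take_left' rfl]
  have hdisj := (List.nodup_append.mp hnd).2.2
  by_cases hx : x ∈ l
  · have hxf : x ∉ front := fun hf => hdisj x hf x hx rfl
    rw [if_neg hxf, hinv x, if_pos (List.mem_append.mpr (Or.inr hx)), if_pos hx]
    congr 1
    rw [List.idxOf_append_of_notMem hxf]
    have := List.idxOf_lt_length_of_mem hx
    simp only [List.length_append]
    push_cast
    omega
  · rw [if_neg hx]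
    by_cases hxf : x ∈ front
    · rw [if_pos hxf]
    · rw [if_neg hxf, hinv x,
        if_neg (fun h => (List.mem_append.mp h).elim hxf hx)]

-- the main A-side lemma: from a nonempty stack with top v and remaining path
-- avoiding everything strictly below v, the fold pushes exactly pvR (pvAfterLast v p)
lemma pv_mainA : ∀ (n : Nat) (p : List Int), p.length ≤ n →
    ∀ (d : PySem.Dict Int Int) (v : Int) (rest : List Int),
    (v :: rest).Nodup → pvInv d (v :: rest) → (∀ x ∈ p, x ∉ rest) →
    ∃ d', p.foldl pvStepA (d, v :: rest) =
          (d', (pvR (pvAfterLast v p)).reverse ++ v :: rest)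
      ∧ pvInv d' ((pvR (pvAfterLast v p)).reverse ++ v :: rest)
      ∧ ((pvR (pvAfterLast v p)).reverse ++ v :: rest).Nodup := by
  intro n
  induction n with
  | zero =>
    intro p hp d v rest hnd hinv havoid
    have hpnil : p = [] := List.eq_nil_of_length_eq_zero (by omega)
    subst hpnil
    exact ⟨d, by simp [pvAfterLast, pvR_nil], by simpa [pvAfterLast, pvR_nil] using hinv,
      by simpa [pvAfterLast, pvR_nil] using hnd⟩
  | succ n ih =>
    intro p hp d v rest hnd hinv havoid
    cases p with
    | nil =>
      exact ⟨d, by simp [pvAfterLast, pvR_nil], by simpa [pvAfterLast, pvR_nil] using hinv,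
        by simpa [pvAfterLast, pvR_nil] using hnd⟩
    | cons x q =>
      rw [List.foldl_cons]
      by_cases hxv : x = v
      · -- repeat of the stack top: the inner loop pops zero elements
        subst hxv
        have hget : d.get? x = some ((rest.length : Int)) := by
          rw [hinv x, if_pos (List.mem_cons_self ..)]
          simp [List.idxOf_cons_self]
        have hc : ((((x :: rest).length : Nat) : Int) - (rest.length : Int) - 1).toNat = 0 := by
          simp only [List.length_cons]
          push_cast
          omega
        have hstep : pvStepA (d, x :: rest) x = (d, x :: rest) := by
          simp only [pvStepA, hget, hc, pvPopA]
        have hq : q.length ≤ n := by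
          simp only [List.length_cons] at hp
          omega
        obtain ⟨d', h1, h2, h3⟩ := ih q hq d x rest hnd hinv
          (fun y hy => havoid y (List.mem_cons_of_mem _ hy))
        refine ⟨d', ?_, ?_, ?_⟩
        · rw [hstep, h1, pvAfterLast_cons_self]
        · rw [pvAfterLast_cons_self]; exact h2
        · rw [pvAfterLast_cons_self]; exact h3
      · -- x is fresh (x ∈ rest is excluded by havoid): push x
        have hxrest : x ∉ rest := havoid x (List.mem_cons_self ..)
        have hxnot : x ∉ v :: rest := by simp [hxv, hxrest]
        have hget : d.get? x = none := by rw [hinv x, if_neg hxnot]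
        have hstep : pvStepA (d, v :: rest) x =
            (d.insert x (((v :: rest).length : Nat) : Int), x :: v :: rest) := by
          simp only [pvStepA, hget]
        have hnd2 : (x :: v :: rest).Nodup := List.nodup_cons.mpr ⟨hxnot, hnd⟩
        have hinv2 := pvInv_push d (v :: rest) x hinv hxnot
        by_cases hvq : v ∈ q
        · -- v reappears later: split q at its FIRST later occurrence
          obtain ⟨s, t, rfl, hvs⟩ := pv_mem_split_first v q hvq
          have hlen := hp
          simp only [List.length_cons, List.length_append] at hlen
          have hcond_s : ∀ y ∈ s, y ∉ v :: rest := by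
            intro y hy
            simp only [List.mem_cons, not_or]
            exact ⟨fun h => hvs (h ▸ hy), havoid y (by simp [hy])⟩
          obtain ⟨d₂, hs1, hs2, hs3⟩ := ih s (by omega) _ x (v :: rest) hnd2 hinv2 hcond_s
          set M : List Int := (pvR (pvAfterLast x s)).reverse with hM
          have hvM : v ∉ M := by
            intro hm
            rw [hM, List.mem_reverse] at hm
            exact hvs (pvAfterLast_subset x v s (pvR_subset _ v hm))
          have hidx : List.idxOf v (M ++ x :: v :: rest) = M.length + 1 := by
            rw [List.idxOf_append_of_notMem hvM, List.idxOf_cons_ne _ (fun h => hxv h)]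
            simp [List.idxOf_cons_self]
          have hvmem : v ∈ M ++ x :: v :: rest := by simp
          have hget2 : d₂.get? v =
              some (((M ++ x :: v :: rest).length : Int) - 1 - ((M.length + 1 : Nat) : Int)) := by
            rw [hs2 v, if_pos hvmem, hidx]
          have hc2 : ((((M ++ x :: v :: rest).length : Nat) : Int) -
              ((((M ++ x :: v :: rest).length : Nat) : Int) - 1 - ((M.length + 1 : Nat) : Int)) - 1).toNat
              = M.length + 1 := by
            simp only [List.length_append, List.length_cons]
            push_cast
            omega
          have hLsplit : M ++ x :: v :: rest = (M ++ [x]) ++ v :: rest := by simp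
          have hcnt : ((((M ++ x :: v :: rest).length : Nat) : Int) -
              ((((M ++ x :: v :: rest).length : Nat) : Int) - 1 - (((M.length + 1 : Nat)) : Int)) - 1).toNat
              = (M ++ [x]).length := by
            simp only [List.length_append, List.length_cons, List.length_nil]
            omega
          have hstep2 : pvStepA (d₂, M ++ x :: v :: rest) v =
              pvPopA (M ++ [x]).length d₂ ((M ++ [x]) ++ v :: rest) := by
            simp only [pvStepA, hget2]
            rw [hcnt, hLsplit]
          have hsnd : (pvPopA (M ++ [x]).length d₂ ((M ++ [x]) ++ v :: rest)).2 = v :: rest := by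
            rw [pvPopA_snd, List.drop_left' rfl]
          have hinv3 : pvInv (pvPopA (M ++ [x]).length d₂ ((M ++ [x]) ++ v :: rest)).1 (v :: rest) := by
            apply pvInv_pop
            · rw [← hLsplit]; exact hs2
            · rw [← hLsplit]; exact hs3
          obtain ⟨d', ht1, ht2, ht3⟩ := ih t (by omega)
            (pvPopA (M ++ [x]).length d₂ ((M ++ [x]) ++ v :: rest)).1 v rest hnd hinv3
            (fun y hy => havoid y (by simp [hy]))
          have hpair : pvStepA (d₂, M ++ x :: v :: rest) v =
              ((pvPopA (M ++ [x]).length d₂ ((M ++ [x]) ++ v :: rest)).1, v :: rest) := by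
            rw [hstep2]
            exact Prod.ext rfl hsnd
          have hAL : pvAfterLast v (x :: (s ++ v :: t)) = pvAfterLast v t := by
            have hm : v ∈ s ++ v :: t := by simp
            simp only [pvAfterLast, hm, if_pos]
            exact pvAfterLast_append v s t hvs
          refine ⟨d', ?_, ?_, ?_⟩
          · rw [hstep, List.foldl_append, hs1, List.foldl_cons, hpair, ht1, hAL]
          · rw [hAL]; exact ht2
          · rw [hAL]; exact ht3
        · -- v never reappears: the whole of p is kept above v
          have hvp : v ∉ x :: q := by
            simp only [List.mem_cons, not_or]
            exact ⟨fun h => hxv h.symm, hvq⟩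
          have hcond_q : ∀ y ∈ q, y ∉ v :: rest := by
            intro y hy
            simp only [List.mem_cons, not_or]
            exact ⟨fun h => hvq (h ▸ hy), havoid y (List.mem_cons_of_mem _ hy)⟩
          have hq : q.length ≤ n := by
            simp only [List.length_cons] at hp
            omega
          obtain ⟨d', h1, h2, h3⟩ := ih q hq _ x (v :: rest) hnd2 hinv2 hcond_q
          have hAL : pvAfterLast v (x :: q) = x :: q := pvAfterLast_of_not_mem _ _ hvp
          refine ⟨d', ?_, ?_, ?_⟩
          · rw [hstep, h1, hAL, pvR_cons, List.reverse_cons, List.append_assoc]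
            simp
          · rw [hAL, pvR_cons, List.reverse_cons, List.append_assoc]
            simpa using h2
          · rw [hAL, pvR_cons, List.reverse_cons, List.append_assoc]
            simpa using h3

-- ===== VERDICT (by name: the statement is the Claim_ definition above) =====
theorem remove_loops_spec : Claim_equal_remove_loops := by
  intro path _
  show remove_loops path = remove_loops_alt path
  rw [remove_loops_alt_eq_pvR]
  cases path with
  | nil => simp [remove_loops, pvR_nil]
  | cons v p =>
    unfold remove_loops
    rw [List.foldl_cons]
    have hstep : pvStepA (PySem.Dict.empty, []) v = (PySem.Dict.empty.insert v 0, [v]) := by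
      simp [pvStepA, PySem.Dict.get?_empty]
    rw [hstep]
    have hinv : pvInv (PySem.Dict.empty.insert v 0) [v] := by
      intro x
      rw [PySem.Dict.get?_insert]
      by_cases hx : x = v <;> simp [hx, PySem.Dict.get?_empty, List.idxOf_cons_self]
    obtain ⟨d', heq, _, _⟩ := pv_mainA p.length p le_rfl _ v [] (by simp) hinv (by simp)
    rw [heq]
    show ((pvR (pvAfterLast v p)).reverse ++ [v]).reverse = pvR (v :: p)
    rw [pvR_cons]
    simp
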